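-- pv_equiv track=rewrite | github.com/SanchayanDutta/Optimal-Question-Asking | k-ary-100/oqa_kary_oracle_dp.py | ids_from_mask
-- ===== SOURCE A (Python) =====
-- from typing import Dict, List, Any, Tuple
--
-- def ids_from_mask(mask: int, index2id: List[str]) -> List[str]:
--     out, i = [], 0
--     while mask:
--         if mask & 1:
--             out.append(index2id[i])
--         mask >>= 1
--         i += 1
--     return out
-- ===== SOURCE B (Python) =====
-- def ids_from_mask(mask, index2id):
--     out = []
--     while mask > 0:
--         low = mask & (mask - 1)   # mask with its lowest set bit cleared
--         lsb = mask - low          # the isolated lowest set bit (a power of two)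
--         out.append(index2id[lsb.bit_length() - 1])
--         mask = low
--     return out
-- ===== Notes on version B (the rewrite author's own statement) =====
-- stated objective: alternative
-- what changed: B iterates only over the set bits of the mask by repeatedly isolating the lowest set bit (lsb = mask - (mask & (mask-1))), deriving its index via bit_length, and clearing it, instead of A's bit-by-bit scan over every position with a running index.
import Mathlib
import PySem

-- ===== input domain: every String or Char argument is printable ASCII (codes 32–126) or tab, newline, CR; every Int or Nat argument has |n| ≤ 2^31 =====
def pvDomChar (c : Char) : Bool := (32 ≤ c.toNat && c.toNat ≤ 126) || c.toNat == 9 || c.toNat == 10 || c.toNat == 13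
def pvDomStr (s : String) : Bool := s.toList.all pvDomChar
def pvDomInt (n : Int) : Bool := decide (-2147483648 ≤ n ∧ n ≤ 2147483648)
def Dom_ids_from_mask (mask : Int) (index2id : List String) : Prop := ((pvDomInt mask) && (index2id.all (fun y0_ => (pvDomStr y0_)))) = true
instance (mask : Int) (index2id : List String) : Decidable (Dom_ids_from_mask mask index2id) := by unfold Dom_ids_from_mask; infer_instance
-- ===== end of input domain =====

-- B iterates only over the SET bits of the mask (isolate lowest set bit, index it by its
-- bit length, clear it) instead of scanning every bit position; alternative algorithm,
-- same return value on the stated domain.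

-- ===== PORT A =====
-- A's `while mask:` loop; the guard `0 < mask` makes it total — for mask < 0 the Python
-- loop never terminates normally (it raises IndexError), which Pre_ excludes.
-- `mask & 1` → PySem.Int.band mask 1 (truthy ⇔ ≠ 0); `mask >>= 1` → floor division by 2,
-- exact for every int.
def idsFromMaskLoop (mask : Int) (i : Nat) (out : List String) (index2id : List String) : List String :=
  if _h : 0 < mask then
    let out' :=
      if PySem.Int.band mask 1 ≠ 0 then
        match PySem.List.pyGet? index2id (i : Int) with
        | some s => out ++ [s]
        | none => out      -- Python raises IndexError here; outside Pre_
      else out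
    idsFromMaskLoop (PySem.Int.floordiv mask 2) (i + 1) out' index2id
  else out
termination_by mask.toNat
decreasing_by
  rw [PySem.Int.floordiv_eq_ediv_of_pos (by norm_num)]
  omega

def ids_from_mask (mask : Int) (index2id : List String) : List String :=
  idsFromMaskLoop mask 0 [] index2id

-- ===== PORT B =====
-- B's `while mask > 0:` loop; on positive ints Python's `&`, `-` and the loop value match
-- Nat ops exactly (mask.toNat = mask for mask > 0, = 0 otherwise, and the loop body only
-- runs for positive values), and `lsb.bit_length() - 1` = Nat.log2 lsb for lsb > 0.
def idsFromMaskAltLoop (n : Nat) (out : List String) (index2id : List String) : List String :=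
  if _h : 0 < n then
    let low := n &&& (n - 1)        -- n with its lowest set bit cleared
    let lsb := n - low              -- the isolated lowest set bit
    match PySem.List.pyGet? index2id ((Nat.log2 lsb : Nat) : Int) with
    | some s => idsFromMaskAltLoop low (out ++ [s]) index2id
    | none => out                   -- Python raises IndexError here; outside Pre_
  else out
termination_by n
decreasing_by
  exact Nat.lt_of_le_of_lt Nat.and_le_right (by omega)

def ids_from_mask_alt (mask : Int) (index2id : List String) : List String :=
  idsFromMaskAltLoop mask.toNat [] index2id

-- ===== PRECONDITION & SPEC =====
-- Exactly the inputs on which Python A returns: for mask < 0 or mask ≥ 2^len(index2id)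
-- some visited bit index reaches len(index2id) and A raises IndexError.
def Pre_ids_from_mask (mask : Int) (index2id : List String) : Prop :=
  0 ≤ mask ∧ mask < 2 ^ index2id.length
instance (mask : Int) (index2id : List String) : Decidable (Pre_ids_from_mask mask index2id) := by
  unfold Pre_ids_from_mask; infer_instance

def pvWitness_ids_from_mask : Int × List String := (5, ["a", "b", "c"])

def Spec_ids_from_mask (mask : Int) (index2id : List String) (out : List String) : Prop := out = ids_from_mask_alt mask index2id
instance (mask : Int) (index2id : List String) (out : List String) : Decidable (Spec_ids_from_mask mask index2id out) := by unfold Spec_ids_from_mask; infer_instance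

-- ===== CLAIM (what is proved, stated in full; the proofs are below) =====
def Claim_equal_ids_from_mask : Prop := ∀ (mask : Int) (index2id : List String), Dom_ids_from_mask mask index2id → Pre_ids_from_mask mask index2id → Spec_ids_from_mask mask index2id (ids_from_mask mask index2id)

-- ===== LEMMAS AND PROOFS =====

-- Accumulator-free spec of A's loop on a natural number, mirroring A's skip-on-miss shape.
def specA (index2id : List String) (n : Nat) (i : Nat) : List String :=
  if _h : 0 < n then
    let rest := specA index2id (n / 2) (i + 1)
    if n % 2 = 1 then
      match PySem.List.pyGet? index2id (i : Int) with
      | some s => s :: rest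
      | none => rest
    else rest
  else []
termination_by n
decreasing_by omega

theorem specA_zero (index2id : List String) (i : Nat) : specA index2id 0 i = [] := by
  rw [specA]; simp

-- unfolding helper: specA on an even argument descends to its half with shifted offset
theorem specA_two_mul (index2id : List String) (k i : Nat) :
    specA index2id (2 * k) i = specA index2id k (i + 1) := by
  by_cases hk : 0 < k
  · rw [specA]
    have h : 0 < 2 * k := by omega
    have hm : ¬ ((2 * k) % 2 = 1) := by omega
    have hd : 2 * k / 2 = k := by omega
    rw [dif_pos h, if_neg hm, hd]
  · have : k = 0 := by omega
    subst this
    simp [specA_zero]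

-- A's loop equals the accumulator-free spec
theorem idsFromMaskLoop_eq_specA (index2id : List String) :
    ∀ (n : Nat) (i : Nat) (out : List String),
      idsFromMaskLoop ((n : Nat) : Int) i out index2id = out ++ specA index2id n i := by
  intro n
  induction n using Nat.strong_induction_on with
  | _ n ih =>
    intro i out
    by_cases hn : 0 < n
    · rw [idsFromMaskLoop, specA]
      have h0 : (0 : Int) < (n : Int) := by exact_mod_cast hn
      have hband : PySem.Int.band (n : Int) 1 = ((n &&& 1 : Nat) : Int) := by
        exact_mod_cast PySem.Int.band_natCast n 1
      have hone : n &&& 1 = n % 2 := Nat.and_one_is_mod n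
      have hdiv : PySem.Int.floordiv (n : Int) 2 = ((n / 2 : Nat) : Int) := by
        exact_mod_cast PySem.Int.floordiv_natCast n 2
      rw [dif_pos h0, dif_pos hn, hdiv, hband, hone]
      by_cases hodd : n % 2 = 1
      · have hne : ((n % 2 : Nat) : Int) ≠ 0 := by omega
        rw [if_pos hne, if_pos hodd]
        cases hget : PySem.List.pyGet? index2id (i : Int) with
        | some s =>
          rw [ih (n / 2) (by omega) (i + 1) (out ++ [s])]
          simp
        | none =>
          exact ih (n / 2) (by omega) (i + 1) out
      · have hz : n % 2 = 0 := by omega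
        have hne : ¬ ((n % 2 : Nat) : Int) ≠ 0 := by omega
        rw [if_neg hne, if_neg hodd]
        exact ih (n / 2) (by omega) (i + 1) out
    · have : n = 0 := by omega
      subst this
      rw [idsFromMaskLoop, specA]
      simp

-- clearing the lowest set bit: the two parity cases of n &&& (n - 1)
theorem land_pred_odd (n : Nat) (h : n % 2 = 1) : n &&& (n - 1) = n - 1 := by
  apply Nat.eq_of_testBit_eq
  intro t
  cases t with
  | zero =>
    rw [Nat.testBit_and]
    have h1 : (n - 1) % 2 = 0 := by omega
    simp [Nat.testBit_zero, h1]
  | succ t =>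
    rw [Nat.testBit_and]
    have hdiv : (n - 1) / 2 = n / 2 := by omega
    simp [Nat.testBit_add_one, hdiv]

theorem land_pred_even (n : Nat) (h : n % 2 = 0) (hp : 0 < n) :
    n &&& (n - 1) = 2 * ((n / 2) &&& (n / 2 - 1)) := by
  apply Nat.eq_of_testBit_eq
  intro t
  cases t with
  | zero =>
    rw [Nat.testBit_and]
    have h1 : (2 * ((n / 2) &&& (n / 2 - 1))) % 2 = 0 := by omega
    simp [Nat.testBit_zero, h, h1]
  | succ t =>
    rw [Nat.testBit_and, Nat.testBit_add_one, Nat.testBit_add_one, Nat.testBit_add_one]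
    have hdiv : (n - 1) / 2 = n / 2 - 1 := by omega
    have hdiv2 : (2 * ((n / 2) &&& (n / 2 - 1))) / 2 = (n / 2) &&& (n / 2 - 1) := by omega
    rw [hdiv, hdiv2, Nat.testBit_and]

theorem land_pred_lt (n : Nat) (h : 0 < n) : n &&& (n - 1) < n :=
  Nat.lt_of_le_of_lt Nat.and_le_right (by omega)

theorem log2_two_mul (m : Nat) (h : 0 < m) : Nat.log2 (2 * m) = Nat.log2 m + 1 := by
  rw [Nat.log2_eq_log_two, Nat.log2_eq_log_two, Nat.mul_comm]
  exact Nat.log_mul_base (by norm_num) (by omega)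

-- the index B computes is a set bit of n
theorem testBit_log2_lsb (n : Nat) (h : 0 < n) :
    n.testBit (Nat.log2 (n - (n &&& (n - 1)))) = true := by
  induction n using Nat.strong_induction_on with
  | _ n ih =>
    by_cases hodd : n % 2 = 1
    · rw [land_pred_odd n hodd]
      have h1 : n - (n - 1) = 1 := by omega
      have hl : Nat.log2 1 = 0 := by decide
      rw [h1, hl]
      simp [Nat.testBit_zero, hodd]
    · have hz : n % 2 = 0 := by omega
      have hk : 0 < n / 2 := by omega
      rw [land_pred_even n hz h]
      have hlsb : n - 2 * ((n / 2) &&& (n / 2 - 1)) = 2 * (n / 2 - ((n / 2) &&& (n / 2 - 1))) := by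
        have := land_pred_lt (n / 2) hk
        omega
      have hpos : 0 < n / 2 - ((n / 2) &&& (n / 2 - 1)) := by
        have := land_pred_lt (n / 2) hk
        omega
      rw [hlsb, log2_two_mul _ hpos, Nat.testBit_add_one]
      exact ih (n / 2) (by omega) hk

-- specA satisfies B's lowest-set-bit recursion
theorem specA_lsb (index2id : List String) (n i : Nat) (h : 0 < n) :
    specA index2id n i =
      match PySem.List.pyGet? index2id ((i + Nat.log2 (n - (n &&& (n - 1))) : Nat) : Int) with
      | some s => s :: specA index2id (n &&& (n - 1)) i
      | none => specA index2id (n &&& (n - 1)) i := by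
  induction n using Nat.strong_induction_on generalizing i with
  | _ n ih =>
    by_cases hodd : n % 2 = 1
    · rw [land_pred_odd n hodd]
      have h1 : n - (n - 1) = 1 := by omega
      rw [h1]
      have hl : Nat.log2 1 = 0 := by decide
      rw [hl]
      conv_lhs => rw [specA]
      rw [dif_pos h, if_pos hodd]
      have htail : specA index2id (n - 1) i = specA index2id (n / 2) (i + 1) := by
        have h2 : n - 1 = 2 * (n / 2) := by omega
        rw [h2, specA_two_mul]
      rw [htail]
      simp
    · have hz : n % 2 = 0 := by omega
      have hk : 0 < n / 2 := by omega
      rw [land_pred_even n hz h]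
      have hlsb : n - 2 * ((n / 2) &&& (n / 2 - 1)) = 2 * (n / 2 - ((n / 2) &&& (n / 2 - 1))) := by
        have := land_pred_lt (n / 2) hk
        omega
      have hpos : 0 < n / 2 - ((n / 2) &&& (n / 2 - 1)) := by
        have := land_pred_lt (n / 2) hk
        omega
      have hhead : n = 2 * (n / 2) := by omega
      conv_lhs => rw [hhead, specA_two_mul]
      rw [ih (n / 2) (by omega) (i + 1) hk]
      rw [hlsb, log2_two_mul _ hpos, specA_two_mul]
      have hidx : i + 1 + Nat.log2 (n / 2 - ((n / 2) &&& (n / 2 - 1)))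
          = i + (Nat.log2 (n / 2 - ((n / 2) &&& (n / 2 - 1))) + 1) := by omega
      rw [hidx]

-- B's loop equals the accumulator-free spec when every set bit is a valid index
theorem idsFromMaskAltLoop_eq_specA (index2id : List String) :
    ∀ n out, (∀ t, n.testBit t = true → t < index2id.length) →
      idsFromMaskAltLoop n out index2id = out ++ specA index2id n 0 := by
  intro n
  induction n using Nat.strong_induction_on with
  | _ n ih =>
    intro out H
    by_cases hn : 0 < n
    · have hbit := testBit_log2_lsb n hn
      have hlt : Nat.log2 (n - (n &&& (n - 1))) < index2id.length := H _ hbit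
      have hget : PySem.List.pyGet? index2id ((Nat.log2 (n - (n &&& (n - 1))) : Nat) : Int)
          = some index2id[Nat.log2 (n - (n &&& (n - 1)))] := by
        rw [PySem.List.pyGet?_natCast]
        exact List.getElem?_eq_getElem hlt
      rw [idsFromMaskAltLoop, dif_pos hn]
      simp only [hget]
      have Hlow : ∀ t, (n &&& (n - 1)).testBit t = true → t < index2id.length := by
        intro t ht
        apply H t
        rw [Nat.testBit_and] at ht
        exact (Bool.and_eq_true_iff.mp ht).1
      rw [ih (n &&& (n - 1)) (land_pred_lt n hn) _ Hlow]
      rw [specA_lsb index2id n 0 hn]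
      have h0 : ((0 + Nat.log2 (n - (n &&& (n - 1))) : Nat) : Int)
          = ((Nat.log2 (n - (n &&& (n - 1))) : Nat) : Int) := by
        norm_num
      rw [h0]
      simp only [hget]
      simp
    · have : n = 0 := by omega
      subst this
      rw [idsFromMaskAltLoop]
      simp [specA_zero]

-- ===== VERDICT (by name: the statement is the Claim_ definition above) =====
theorem ids_from_mask_spec : Claim_equal_ids_from_mask := by
  intro mask index2id _hDom hPre
  unfold Spec_ids_from_mask
  obtain ⟨h0, hlt⟩ := hPre
  set n := mask.toNat with hn
  have hmask : mask = (n : Int) := by omega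
  have hltn : n < 2 ^ index2id.length := by
    have : ((2 : Int) ^ index2id.length) = ((2 ^ index2id.length : Nat) : Int) := by
      push_cast; ring
    omega
  have H : ∀ t, n.testBit t = true → t < index2id.length := by
    intro t ht
    by_contra hge
    have h1 : 2 ^ t ≤ n := Nat.ge_two_pow_of_testBit ht
    have h2 : 2 ^ index2id.length ≤ 2 ^ t := Nat.pow_le_pow_right (by norm_num) (by omega)
    omega
  unfold ids_from_mask ids_from_mask_alt
  rw [hmask]
  rw [idsFromMaskLoop_eq_specA index2id n 0 []]
  have : ((n : Int).toNat) = n := by omega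
  rw [this, idsFromMaskAltLoop_eq_specA index2id n [] H]
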